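-- pv_equiv track=rewrite | github.com/hkhurram122/CSC180 | Lab7.py | get_row_to_swap
-- ===== SOURCE A (Python) =====
-- def get_lead_ind(row):
--     for i in range(len(row)):
--         if (row[i] != 0):
--             return i
--     return len(row)
--
-- def get_row_to_swap(M, start_i):
--
--
--     leading_nonzeros = {}
--     # dict stores the row index and index of first nonzero
--     for i in range(start_i,len(M)):
--         leading_nonzeros[i] = get_lead_ind(M[i])
--     # minimum value (where first nonzero is) associated with the key (row)
--     return min(leading_nonzeros, key=leading_nonzeros.get)
--
--     """
--     first_nonzero_ind_list = []
--     for j in range(start_i, len(M)):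
--         first_nonzero_ind_list.append(get_lead_ind(M[j]))
--     return first_nonzero_ind_list.index(min(first_nonzero_ind_list)) + start_i
--     """
-- ===== SOURCE B (Python) =====
-- def get_lead_ind(row):
--     for i in range(len(row)):
--         if (row[i] != 0):
--             return i
--     return len(row)
--
-- def get_row_to_swap(M, start_i):
--     best_idx = None
--     best_val = None
--     for i in range(start_i, len(M)):
--         lead = get_lead_ind(M[i])
--         if best_val is None or lead < best_val:
--             best_idx, best_val = i, lead
--     if best_idx is None:
--         raise ValueError("no rows in range")
--     return best_idx
-- ===== Notes on version B (the rewrite author's own statement) =====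
-- stated objective: simpler
-- what changed: Replaces the intermediate dict of leading-nonzero indices plus min(dict, key=dict.get) by a single pass keeping a running best index/value (strict < so the earliest row wins ties).
import Mathlib
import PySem

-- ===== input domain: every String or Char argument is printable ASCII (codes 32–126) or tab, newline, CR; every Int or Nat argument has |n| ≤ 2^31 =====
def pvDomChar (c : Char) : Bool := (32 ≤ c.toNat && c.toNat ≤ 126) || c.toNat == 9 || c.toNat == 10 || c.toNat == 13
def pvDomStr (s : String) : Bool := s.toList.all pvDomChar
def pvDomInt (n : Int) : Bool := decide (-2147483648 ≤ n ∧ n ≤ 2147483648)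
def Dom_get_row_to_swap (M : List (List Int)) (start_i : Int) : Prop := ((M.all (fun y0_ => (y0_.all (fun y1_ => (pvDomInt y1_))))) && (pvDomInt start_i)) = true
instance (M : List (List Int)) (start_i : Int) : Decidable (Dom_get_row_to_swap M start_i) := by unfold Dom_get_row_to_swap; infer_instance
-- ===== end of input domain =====

-- B replaces A's dict of leading-nonzero indices + min(dict, key=dict.get) by one running-minimum pass (simpler).

-- ===== PORT A =====
-- shared helper: get_lead_ind(row) — scan for the first nonzero, returning its index (len(row) if none)
def get_lead_ind_go : List Int → Int → Int
  | [], i => i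
  | x :: xs, i => if x ≠ 0 then i else get_lead_ind_go xs (i + 1)

def get_lead_ind (row : List Int) : Int := get_lead_ind_go row 0

-- the loop building leading_nonzeros
def pvLeadDict (M : List (List Int)) (start_i : Int) : PySem.Dict Int Int :=
  (PySem.List.pyRange start_i (M.length : Int) 1).foldl
    (fun d i => d.insert i (get_lead_ind (PySem.List.pyGetD M i []))) PySem.Dict.empty

def get_row_to_swap (M : List (List Int)) (start_i : Int) : Int :=
  (PySem.List.min? (pvLeadDict M start_i).keys (fun k => (pvLeadDict M start_i).getD k 0)).getD 0
  -- min of an empty dict raises ValueError: excluded by Pre_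

-- ===== PORT B =====
-- the running best (best_idx, best_val); None before the first row
def pvBest (M : List (List Int)) (start_i : Int) : Option (Int × Int) :=
  (PySem.List.pyRange start_i (M.length : Int) 1).foldl
    (fun acc i =>
      match acc with
      | none => some (i, get_lead_ind (PySem.List.pyGetD M i []))
      | some (bi, bv) =>
          if get_lead_ind (PySem.List.pyGetD M i []) < bv then
            some (i, get_lead_ind (PySem.List.pyGetD M i []))
          else some (bi, bv))
    none

def get_row_to_swap_alt (M : List (List Int)) (start_i : Int) : Int :=
  match pvBest M start_i with
  | some (bi, _) => bi
  | none => 0   -- B raises ValueError here (empty range): excluded by Pre_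

-- ===== PRECONDITION & SPEC =====
-- Pre_ excludes exactly the inputs where A raises: start_i ≥ len(M) (min over an empty dict,
-- ValueError) and start_i < -len(M) (M[start_i] IndexError); A returns on every other input.
def Pre_get_row_to_swap (M : List (List Int)) (start_i : Int) : Prop :=
  PySem.Raise.InRange M.length start_i
instance (M : List (List Int)) (start_i : Int) : Decidable (Pre_get_row_to_swap M start_i) := by
  unfold Pre_get_row_to_swap; infer_instance

def pvWitness_get_row_to_swap : List (List Int) × Int := ([[0, 1], [1, 0], [0, 1]], 0)

def Spec_get_row_to_swap (M : List (List Int)) (start_i : Int) (out : Int) : Prop := out = get_row_to_swap_alt M start_i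
instance (M : List (List Int)) (start_i : Int) (out : Int) : Decidable (Spec_get_row_to_swap M start_i out) := by unfold Spec_get_row_to_swap; infer_instance

-- ===== CLAIM (what is proved, stated in full; the proofs are below) =====
def Claim_equal_get_row_to_swap : Prop := ∀ (M : List (List Int)) (start_i : Int), Dom_get_row_to_swap M start_i → Pre_get_row_to_swap M start_i → Spec_get_row_to_swap M start_i (get_row_to_swap M start_i)

-- ===== LEMMAS AND PROOFS =====

-- The two remaining folds agree: A's keys-fold comparing g (the dict lookups) mirrors
-- B's pair-fold comparing f, provided g = f on the list and on the seed.
theorem pv_fold_pair_eq_fold_key (f g : Int → Int) :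
    ∀ (L : List Int), (∀ x ∈ L, g x = f x) → ∀ (b : Int), g b = f b →
    L.foldl
      (fun acc i =>
        let lead := f i
        match acc with
        | none => some (i, lead)
        | some (bi, bv) => if lead < bv then some (i, lead) else some (bi, bv))
      (some (b, f b))
    = (L.foldl
        (fun acc x =>
          match acc with
          | none => some x
          | some m => if g x < g m then some x else some m)
        (some b)).map (fun k => (k, f k))
  | [], _, b, _ => rfl
  | x :: L, h, b, hb => by
    have hx : g x = f x := h x (List.mem_cons_self)
    have hL : ∀ y ∈ L, g y = f y := fun y hy => h y (List.mem_cons_of_mem _ hy)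
    simp only [List.foldl_cons]
    by_cases hlt : f x < f b
    · have : g x < g b := by rw [hx, hb]; exact hlt
      simp only [hlt, if_pos this]
      exact pv_fold_pair_eq_fold_key f g L hL x hx
    · have : ¬ g x < g b := by rw [hx, hb]; exact hlt
      simp only [if_neg this, if_neg hlt]
      exact pv_fold_pair_eq_fold_key f g L hL b hb

theorem get_row_to_swap_eq (M : List (List Int)) (start_i : Int)
    (hpre : PySem.Raise.InRange M.length start_i) :
    get_row_to_swap M start_i = get_row_to_swap_alt M start_i := by
  unfold get_row_to_swap get_row_to_swap_alt pvBest pvLeadDict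
  set f : Int → Int := fun i => get_lead_ind (PySem.List.pyGetD M i []) with hf
  set L : List Int := PySem.List.pyRange start_i (M.length : Int) 1 with hLdef
  -- the dict built by the loop: items are exactly (i, f i) for i in L
  set d : PySem.Dict Int Int :=
    L.foldl (fun d i => d.insert i (f i)) PySem.Dict.empty with hd
  have hnodup : L.Nodup := hLdef ▸ PySem.List.nodup_pyRange_one start_i (M.length : Int)
  have hitems : d.items = L.map (fun i => (i, f i)) := by
    rw [hd]
    have := PySem.Dict.items_foldl_insert_fresh (l := L) (d := PySem.Dict.empty)
      (k := fun i => i) (v := f)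
      (by intro a _; simp [PySem.Dict.contains_empty])
      (by simpa using hnodup)
    simpa using this
  have hkeys : d.keys = L := by
    simp [PySem.Dict.keys, hitems, List.map_map, Function.comp_def]
  have hkeysnodup : d.keys.Nodup := hkeys ▸ hnodup
  have hg : ∀ x ∈ L, d.getD x 0 = f x := by
    intro x hxL
    exact PySem.Dict.getD_of_mem_items (d := d) (k := x) (v := f x)
      (by rw [hitems]; exact List.mem_map_of_mem hxL) hkeysnodup 0
  -- split off the first element of the nonempty range
  obtain ⟨h1, h2⟩ := hpre
  have hcons : L = start_i :: PySem.List.pyRange (start_i + 1) (M.length : Int) 1 := by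
    rw [hLdef]; exact PySem.List.pyRange_one_cons (by omega)
  set L' : List Int := PySem.List.pyRange (start_i + 1) (M.length : Int) 1 with hL'
  have hmem0 : start_i ∈ L := by rw [hcons]; exact List.mem_cons_self
  have hgL' : ∀ x ∈ L', d.getD x 0 = f x := fun x hx => hg x (by rw [hcons]; exact List.mem_cons_of_mem _ hx)
  have hg0 : d.getD start_i 0 = f start_i := hg start_i hmem0
  rw [hkeys]
  have hmin : PySem.List.min? L (fun k => d.getD k 0)
      = L'.foldl
          (fun acc x =>
            match acc with
            | none => some x
            | some m => if d.getD x 0 < d.getD m 0 then some x else some m)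
          (some start_i) := by
    rw [hcons]
    -- min? is a left fold; align its matcher with our spelling pointwise
    show List.foldl _ none (start_i :: L') = _
    rw [List.foldl_cons]
    exact Eq.trans (List.foldl_ext _ _ _ (fun acc x _hx => by cases acc <;> rfl)) rfl
  conv_rhs => rw [hcons]
  simp only [List.foldl_cons]
  rw [pv_fold_pair_eq_fold_key f (fun k => d.getD k 0) L' hgL' start_i hg0]
  rw [hmin]
  rcases hres : L'.foldl
      (fun acc x =>
        match acc with
        | none => some x
        | some m => if d.getD x 0 < d.getD m 0 then some x else some m)
      (some start_i) with _ | r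
  · -- a fold seeded with some _ is never none
    exfalso
    have : ∀ (L : List Int) (b : Int),
        (L.foldl (fun acc x =>
          match acc with
          | none => some x
          | some m => if d.getD x 0 < d.getD m 0 then some x else some m) (some b)) ≠ none := by
      intro L
      induction L with
      | nil => intro b h; simp at h
      | cons x L ih => intro b; simp only [List.foldl_cons]; split_ifs <;> exact ih _
    exact this L' start_i hres
  · simp [hres]

-- ===== VERDICT (by name: the statement is the Claim_ definition above) =====
theorem get_row_to_swap_spec : Claim_equal_get_row_to_swap := by
  intro M start_i _ hpre
  unfold Spec_get_row_to_swap
  exact get_row_to_swap_eq M start_i hpre
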